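-- pv_equiv track=rewrite | github.com/laijasonk/kaggle | 2018_data_science_bowl/submission/scripts/final_functions.py | nuclei_list_to_kaggle_format
-- ===== SOURCE A (Python) =====
-- def nuclei_list_to_kaggle_format( nuclei_list, image_id ):
--
--     """ Nuclei list to formatted Kaggle submit string
--
--     :param nuclei_list: List of nuclei indices (see other functions)
--     :param image_id: id of image
--     :return: String in the format of Kaggle's submission output
--
--     """
--
--     previous = -1
--     kaggle_format = []
--     for idx in range( len( nuclei_list ) ):
--
--         current = nuclei_list[ idx ]
--
--         # kaggle format has index followed by number of consecutive pixels
--         if current - 1 == previous: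
--             kaggle_format[-1] += 1
--         else:
--             kaggle_format.append( current )
--             kaggle_format.append( 1 )
--
--         previous = nuclei_list[ idx ]
--
--     kaggle_string = [ str( element ) for element in kaggle_format ]
--     return [str( image_id ), str( ' '.join( kaggle_string ) )]
-- ===== SOURCE B (Python) =====
-- def nuclei_list_to_kaggle_format(nuclei_list, image_id):
--     """Two-pointer run extraction: for each run start i, advance j across the
--     consecutive stretch, emit (start value, run length), then jump i to j."""
--     parts = []
--     i = 0
--     n = len(nuclei_list)
--     while i < n:
--         j = i + 1
--         while j < n and nuclei_list[j] == nuclei_list[j - 1] + 1: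
--             j += 1
--         parts.append(str(nuclei_list[i]))
--         parts.append(str(j - i))
--         i = j
--     return [str(image_id), ' '.join(parts)]
-- ===== Notes on version B (the rewrite author's own statement) =====
-- stated objective: alternative
-- what changed: Replaced A's state-machine (previous-element register plus in-place increment of the output's last slot) with a two-pointer run scanner that extracts each consecutive run as a whole and emits (start, length) pairs directly; Pre_ excludes lists starting with 0, where A raises IndexError.
import Mathlib
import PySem

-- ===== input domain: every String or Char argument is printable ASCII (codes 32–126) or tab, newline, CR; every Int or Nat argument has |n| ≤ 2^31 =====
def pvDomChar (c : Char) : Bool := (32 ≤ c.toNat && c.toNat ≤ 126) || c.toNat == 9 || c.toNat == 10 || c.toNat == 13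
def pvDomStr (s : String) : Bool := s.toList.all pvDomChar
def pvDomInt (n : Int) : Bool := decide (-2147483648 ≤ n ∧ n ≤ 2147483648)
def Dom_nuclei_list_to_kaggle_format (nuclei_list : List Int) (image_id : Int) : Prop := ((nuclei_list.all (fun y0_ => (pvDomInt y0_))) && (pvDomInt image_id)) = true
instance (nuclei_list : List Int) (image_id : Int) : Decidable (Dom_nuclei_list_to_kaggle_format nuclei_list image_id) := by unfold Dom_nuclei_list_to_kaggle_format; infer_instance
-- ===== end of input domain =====

-- B replaces A's one-element state machine (previous register + in-place increment of the
-- output's last slot) by a two-pointer scanner that extracts each consecutive run whole;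
-- objective: alternative decomposition, same O(n) cost.

-- ===== PORT A =====
-- kaggle_format[-1] += 1 : increment the last element (Python raises IndexError on the
-- empty list; Pre_ excludes exactly the inputs reaching that, so the [] case is unreachable)
def pvIncLast : List Int → List Int
  | [] => []
  | [x] => [x + 1]
  | x :: y :: xs => x :: pvIncLast (y :: xs)

-- the for-loop over range(len(nuclei_list)): state = (previous, kaggle_format)
def pvALoop : List Int → Int → List Int → List Int
  | [], _, acc => acc
  | c :: rest, prev, acc =>
    if c - 1 = prev then pvALoop rest c (pvIncLast acc)
    else pvALoop rest c (acc ++ [c, 1])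

def nuclei_list_to_kaggle_format (nuclei_list : List Int) (image_id : Int) : List String :=
  let kaggle_format := pvALoop nuclei_list (-1) []
  let kaggle_string := kaggle_format.map PySem.Int.toStr
  [PySem.Int.toStr image_id, PySem.Str.join " " kaggle_string]

-- ===== PORT B =====
-- inner while loop: starting after run head p, count how many further elements continue
-- the consecutive run (j - i - 1) and return the rest of the list from index j
def pvTakeRun : Int → List Int → Nat × List Int
  | _, [] => (0, [])
  | p, y :: ys => if y = p + 1 then ((pvTakeRun y ys).1 + 1, (pvTakeRun y ys).2) else (0, y :: ys)

lemma pvTakeRun_len (p : Int) (l : List Int) : (pvTakeRun p l).2.length ≤ l.length := by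
  induction l generalizing p with
  | nil => simp [pvTakeRun]
  | cons y ys ih =>
    simp only [pvTakeRun]
    split
    · exact le_trans (ih y) (Nat.le_succ _)
    · simp

-- outer while loop: emit str(start), str(run length), continue at the rest
def pvBParts : List Int → List String
  | [] => []
  | x :: rest =>
      PySem.Int.toStr x :: PySem.Int.toStr (((pvTakeRun x rest).1 : Int) + 1) ::
        pvBParts (pvTakeRun x rest).2
termination_by l => l.length
decreasing_by exact Nat.lt_succ_of_le (pvTakeRun_len _ _)

def nuclei_list_to_kaggle_format_alt (nuclei_list : List Int) (image_id : Int) : List String :=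
  [PySem.Int.toStr image_id, PySem.Str.join " " (pvBParts nuclei_list)]

-- ===== PRECONDITION & SPEC =====
-- Pre_ excludes exactly the lists whose first element is 0: there A's 'current - 1 == previous'
-- test fires against the initial sentinel previous = -1 and A raises IndexError.
def Pre_nuclei_list_to_kaggle_format (nuclei_list : List Int) (image_id : Int) : Prop :=
  nuclei_list.head? ≠ some 0
instance (nuclei_list : List Int) (image_id : Int) : Decidable (Pre_nuclei_list_to_kaggle_format nuclei_list image_id) := by unfold Pre_nuclei_list_to_kaggle_format; infer_instance

def pvWitness_nuclei_list_to_kaggle_format : List Int × Int := ([1, 2, 3, 5], 9)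

def Spec_nuclei_list_to_kaggle_format (nuclei_list : List Int) (image_id : Int) (out : List String) : Prop := out = nuclei_list_to_kaggle_format_alt nuclei_list image_id
instance (nuclei_list : List Int) (image_id : Int) (out : List String) : Decidable (Spec_nuclei_list_to_kaggle_format nuclei_list image_id out) := by unfold Spec_nuclei_list_to_kaggle_format; infer_instance

-- ===== CLAIM (what is proved, stated in full; the proofs are below) =====
def Claim_equal_nuclei_list_to_kaggle_format : Prop := ∀ (nuclei_list : List Int) (image_id : Int), Dom_nuclei_list_to_kaggle_format nuclei_list image_id → Pre_nuclei_list_to_kaggle_format nuclei_list image_id → Spec_nuclei_list_to_kaggle_format nuclei_list image_id (nuclei_list_to_kaggle_format nuclei_list image_id)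
-- ===== LEMMAS AND PROOFS =====

-- Int-level mirror of pvBParts (proof helper)
def pvRunsInt : List Int → List Int
  | [] => []
  | x :: rest =>
      x :: (((pvTakeRun x rest).1 : Int) + 1) :: pvRunsInt (pvTakeRun x rest).2
termination_by l => l.length
decreasing_by exact Nat.lt_succ_of_le (pvTakeRun_len _ _)

lemma pvBParts_eq_map (l : List Int) : pvBParts l = (pvRunsInt l).map PySem.Int.toStr := by
  induction l using pvRunsInt.induct with
  | case1 => simp [pvBParts, pvRunsInt]
  | case2 x rest ih => rw [pvBParts, pvRunsInt]; simp [ih]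

lemma pvIncLast_append (acc : List Int) (v : Int) :
    pvIncLast (acc ++ [v]) = acc ++ [v + 1] := by
  induction acc with
  | nil => simp [pvIncLast]
  | cons a as ih =>
    cases as with
    | nil => simp [pvIncLast]
    | cons b bs => simpa [pvIncLast] using ih

lemma pvALoop_run (l : List Int) : ∀ (p : Int) (acc : List Int) (v : Int),
    pvALoop l p (acc ++ [v]) =
      acc ++ (v + ((pvTakeRun p l).1 : Int)) :: pvRunsInt (pvTakeRun p l).2 := by
  induction l with
  | nil => intro p acc v; simp [pvALoop, pvTakeRun, pvRunsInt]
  | cons y ys ih =>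
    intro p acc v
    by_cases h : y - 1 = p
    · have hy : y = p + 1 := by omega
      rw [pvALoop]
      simp only [if_pos h, pvIncLast_append, ih y (acc) (v + 1), pvTakeRun, if_pos hy]
      have : v + 1 + ((pvTakeRun y ys).1 : Int) = v + (((pvTakeRun y ys).1 + 1 : Nat) : Int) := by
        push_cast; ring
      rw [this]
    · have hy : ¬ y = p + 1 := by omega
      rw [pvALoop]
      simp only [if_neg h]
      have hsplit : (acc ++ [v]) ++ [y, 1] = (acc ++ [v, y]) ++ [1] := by simp
      rw [hsplit, ih y (acc ++ [v, y]) 1]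
      simp only [pvTakeRun, if_neg hy, pvRunsInt]
      simp [add_comm]

-- ===== VERDICT (by name: the statement is the Claim_ definition above) =====
theorem nuclei_list_to_kaggle_format_spec : Claim_equal_nuclei_list_to_kaggle_format := by
  intro l image_id _dom pre
  unfold Spec_nuclei_list_to_kaggle_format nuclei_list_to_kaggle_format
    nuclei_list_to_kaggle_format_alt
  cases l with
  | nil => simp [pvALoop, pvBParts]
  | cons x xs =>
    have hx : ¬ (x - 1 = -1) := by
      intro h
      exact pre (by simp only [List.head?_cons, Option.some.injEq]; omega)
    rw [pvBParts_eq_map]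
    simp only [pvALoop, if_neg hx]
    have : ([] : List Int) ++ [x, 1] = [x] ++ [1] := by simp
    rw [this, pvALoop_run xs x [x] 1, pvRunsInt]
    simp [add_comm]
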